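-- pv_equiv track=rewrite | github.com/MER-GROUP/COURSES | ARCHIVE/Python. Поколение Python - курс для продвинутых/Модуль 5/dict_24.py | __search
-- ===== SOURCE A (Python) =====
-- def __search(find, dictor):
-- 	arr = list()
-- 	for i in find:
-- 		check = False
-- 		for k, v in dictor.items():
-- 			for city in v:
-- 				if i == city:
-- 					arr.append(k)
-- 					check = True
-- 					break
-- 			if check:
-- 				break
-- 	return arr
-- ===== SOURCE B (Python) =====
-- def __search(find, dictor):
--     index = {}
--     for k, v in dictor.items():
--         for city in v:
--             if city not in index:
--                 index[city] = k
--     return [index[i] for i in find if i in index]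
-- ===== Notes on version B (the rewrite author's own statement) =====
-- stated objective: faster
-- what changed: B precomputes a city-to-first-key reverse index in one pass over the dict, then answers each query with a single O(1) lookup, instead of A's rescan of the whole dict for every item.
import Mathlib
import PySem

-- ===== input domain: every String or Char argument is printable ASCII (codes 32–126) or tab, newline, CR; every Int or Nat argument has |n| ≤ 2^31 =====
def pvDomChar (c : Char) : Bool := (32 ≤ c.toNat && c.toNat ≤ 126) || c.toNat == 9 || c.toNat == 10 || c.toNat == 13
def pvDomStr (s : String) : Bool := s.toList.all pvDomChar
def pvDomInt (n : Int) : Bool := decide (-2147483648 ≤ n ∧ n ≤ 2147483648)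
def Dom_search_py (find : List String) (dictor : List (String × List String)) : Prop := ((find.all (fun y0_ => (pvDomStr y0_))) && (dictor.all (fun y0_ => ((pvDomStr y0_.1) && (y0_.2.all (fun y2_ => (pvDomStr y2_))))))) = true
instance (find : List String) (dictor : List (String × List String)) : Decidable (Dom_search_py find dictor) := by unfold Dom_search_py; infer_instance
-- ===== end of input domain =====

-- B replaces A's rescan of the whole dict per item by a precomputed city→first-key index (asymptotically faster).

-- ===== PORT A =====
-- inner 'for city in v: if i == city: append k; check = True; break'
def searchPyCityLoop (i : String) (k : String) (v : List String) (arr : List String) :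
    List String × Bool :=
  match v with
  | [] => (arr, false)
  | c :: rest => if i == c then (arr ++ [k], true) else searchPyCityLoop i k rest arr

-- 'for k, v in dictor.items(): … ; if check: break'
def searchPyDictLoop (i : String) (ps : List (String × List String)) (arr : List String) :
    List String × Bool :=
  match ps with
  | [] => (arr, false)
  | (k, v) :: rest =>
    match searchPyCityLoop i k v arr with
    | (arr', true) => (arr', true)
    | (arr', false) => searchPyDictLoop i rest arr'

def search_py (find : List String) (dictor : List (String × List String)) : List String :=
  find.foldl (fun arr i => (searchPyDictLoop i dictor arr).1) []

-- ===== PORT B =====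
-- 'for k, v in dictor.items(): for city in v: if city not in index: index[city] = k'
def searchPyIndex (dictor : List (String × List String)) : PySem.Dict String String :=
  dictor.foldl
    (fun d kv => kv.2.foldl (fun d city => if d.contains city then d else d.insert city kv.1) d)
    PySem.Dict.empty

-- '[index[i] for i in find if i in index]'
def search_py_alt (find : List String) (dictor : List (String × List String)) : List String :=
  let idx := searchPyIndex dictor
  find.filterMap (fun i => idx.get? i)

-- ===== PRECONDITION & SPEC =====
def Spec_search_py (find : List String) (dictor : List (String × List String)) (out : List String) : Prop := out = search_py_alt find dictor
instance (find : List String) (dictor : List (String × List String)) (out : List String) : Decidable (Spec_search_py find dictor out) := by unfold Spec_search_py; infer_instance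

-- ===== CLAIM (what is proved, stated in full; the proofs are below) =====
def Claim_equal_search_py : Prop := ∀ (find : List String) (dictor : List (String × List String)), Dom_search_py find dictor → Spec_search_py find dictor (search_py find dictor)

-- ===== LEMMAS AND PROOFS =====

-- first key of dictor whose value list contains i
def firstKeyFor (i : String) (ps : List (String × List String)) : Option String :=
  (ps.find? (fun kv => kv.2.contains i)).map (·.1)

theorem searchPyCityLoop_eq (i k : String) (v : List String) (arr : List String) :
    searchPyCityLoop i k v arr = if v.contains i then (arr ++ [k], true) else (arr, false) := by
  induction v with
  | nil => simp [searchPyCityLoop]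
  | cons c rest ih =>
    rw [searchPyCityLoop]
    by_cases h : i = c
    · subst h; simp
    · rw [if_neg (by simpa using h), ih]
      have hc : ((c :: rest).contains i) = rest.contains i := by
        simp [List.contains_cons, h]
      rw [hc]

theorem searchPyDictLoop_eq (i : String) (ps : List (String × List String)) (arr : List String) :
    searchPyDictLoop i ps arr =
      match firstKeyFor i ps with
      | some k => (arr ++ [k], true)
      | none => (arr, false) := by
  induction ps generalizing arr with
  | nil => simp [searchPyDictLoop, firstKeyFor]
  | cons kv rest ih =>
    obtain ⟨k, v⟩ := kv
    rw [searchPyDictLoop, searchPyCityLoop_eq]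
    cases h : v.contains i with
    | true =>
      have h' : i ∈ v := by simpa using h
      have hf : firstKeyFor i ((k, v) :: rest) = some k := by
        simp [firstKeyFor, List.find?_cons, h']
      rw [if_pos rfl, hf]
    | false =>
      have h' : i ∉ v := by simpa using h
      have hf : firstKeyFor i ((k, v) :: rest) = firstKeyFor i rest := by
        simp [firstKeyFor, List.find?_cons, h']
      rw [if_neg (by simp), hf]
      exact ih arr

theorem searchPyIndex_inner (i k : String) (v : List String) (d : PySem.Dict String String) :
    (v.foldl (fun d city => if d.contains city then d else d.insert city k) d).get? i
      = (d.get? i).or (if v.contains i then some k else none) := by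
  induction v generalizing d with
  | nil => simp
  | cons c rest ih =>
    rw [List.foldl_cons, ih]
    by_cases hic : i = c
    · subst hic
      cases hc : d.contains i with
      | true =>
        rw [if_pos rfl]
        rw [PySem.Dict.contains_eq_isSome_get?] at hc
        obtain ⟨w, hw⟩ := Option.isSome_iff_exists.mp hc
        simp [hw, List.contains_cons]
      | false =>
        have hnone : d.get? i = none := by
          rw [PySem.Dict.contains_eq_isSome_get?] at hc
          cases h : d.get? i with
          | none => rfl
          | some w => simp [h] at hc
        rw [if_neg (by simp), PySem.Dict.get?_insert_self, hnone]
        simp [List.contains_cons]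
    · have hcc : ((c :: rest).contains i) = rest.contains i := by
        simp [List.contains_cons, hic]
      rw [hcc]
      cases hc : d.contains c with
      | true => rw [if_pos rfl]
      | false => rw [if_neg (by simp), PySem.Dict.get?_insert_of_ne d k hic]

theorem searchPyIndex_get?_aux (i : String) (ps : List (String × List String))
    (d : PySem.Dict String String) :
    (ps.foldl (fun d kv => kv.2.foldl
        (fun d city => if d.contains city then d else d.insert city kv.1) d) d).get? i
      = (d.get? i).or (firstKeyFor i ps) := by
  induction ps generalizing d with
  | nil => simp [firstKeyFor]
  | cons kv rest ih =>
    obtain ⟨k, v⟩ := kv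
    rw [List.foldl_cons, ih, searchPyIndex_inner, Option.or_assoc]
    congr 1
    cases h : v.contains i with
    | true =>
      have h' : i ∈ v := by simpa using h
      simp [firstKeyFor, List.find?_cons, h']
    | false =>
      have h' : i ∉ v := by simpa using h
      simp [firstKeyFor, List.find?_cons, h']

theorem searchPyIndex_get? (i : String) (dictor : List (String × List String)) :
    (searchPyIndex dictor).get? i = firstKeyFor i dictor := by
  rw [searchPyIndex, searchPyIndex_get?_aux]
  simp

theorem search_py_foldl (dictor : List (String × List String)) (find : List String)
    (acc : List String) :
    find.foldl (fun arr i => (searchPyDictLoop i dictor arr).1) acc =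
      acc ++ find.filterMap (fun i => firstKeyFor i dictor) := by
  induction find generalizing acc with
  | nil => simp
  | cons i rest ih =>
    cases h : firstKeyFor i dictor with
    | none =>
      have h1 : (searchPyDictLoop i dictor acc).1 = acc := by rw [searchPyDictLoop_eq, h]
      rw [List.foldl_cons, h1, ih, List.filterMap_cons, h]
    | some k =>
      have h1 : (searchPyDictLoop i dictor acc).1 = acc ++ [k] := by
        rw [searchPyDictLoop_eq, h]
      rw [List.foldl_cons, h1, ih, List.filterMap_cons, h]
      simp

-- ===== VERDICT (by name: the statement is the Claim_ definition above) =====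
theorem search_py_spec : Claim_equal_search_py := by
  intro find dictor _
  unfold Spec_search_py search_py search_py_alt
  rw [search_py_foldl]
  simp [searchPyIndex_get?]
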